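-- pv_equiv track=rewrite | github.com/chalume/PCB_JIG_KICAD | export_openings.py | tokenize_sexpr
-- ===== SOURCE A (Python) =====
-- from typing import Any, Dict, Iterable, List, Optional, Sequence, Set, Tuple
--
-- def tokenize_sexpr(text: str) -> List[str]:
--     tokens: List[str] = []
--     i = 0
--     n = len(text)
--
--     while i < n:
--         c = text[i]
--
--         if c.isspace():
--             i += 1
--             continue
--
--         if c in ("(", ")"):
--             tokens.append(c)
--             i += 1
--             continue
--
--         if c == '"':
--             i += 1
--             buf: List[str] = []
--             while i < n:
--                 if text[i] == "\\" and i + 1 < n: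
--                     buf.append(text[i + 1])
--                     i += 2
--                     continue
--                 if text[i] == '"':
--                     break
--                 buf.append(text[i])
--                 i += 1
--             tokens.append('"' + "".join(buf) + '"')
--             if i < n and text[i] == '"':
--                 i += 1
--             continue
--
--         start = i
--         while i < n and (not text[i].isspace()) and text[i] not in ("(", ")"):
--             i += 1
--         tokens.append(text[start:i])
--
--     return tokens
-- ===== SOURCE B (Python) =====
-- import re
--
-- _TOKEN = re.compile(r'"((?:\\.|[^"])*)"?|[()]|[^\s()]+', re.DOTALL)
-- _ESC = re.compile(r'\\(.)', re.DOTALL)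
--
-- def tokenize_sexpr(text: str):
--     out = []
--     for m in _TOKEN.finditer(text):
--         inner = m.group(1)
--         if inner is None:
--             out.append(m.group(0))
--         else:
--             out.append('"' + _ESC.sub(r'\1', inner) + '"')
--     return out
-- ===== Notes on version B (the rewrite author's own statement) =====
-- stated objective: idiomatic
-- what changed: Replaces A's hand-rolled index/while-loop scanner with a regex-driven tokenizer: one compiled master pattern (quoted string | paren | bare atom) iterated with re.finditer, quoted strings matched raw via a capture group and unescaped in a separate re.sub pass instead of A's inline char-by-char buffer.
import Mathlib
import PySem

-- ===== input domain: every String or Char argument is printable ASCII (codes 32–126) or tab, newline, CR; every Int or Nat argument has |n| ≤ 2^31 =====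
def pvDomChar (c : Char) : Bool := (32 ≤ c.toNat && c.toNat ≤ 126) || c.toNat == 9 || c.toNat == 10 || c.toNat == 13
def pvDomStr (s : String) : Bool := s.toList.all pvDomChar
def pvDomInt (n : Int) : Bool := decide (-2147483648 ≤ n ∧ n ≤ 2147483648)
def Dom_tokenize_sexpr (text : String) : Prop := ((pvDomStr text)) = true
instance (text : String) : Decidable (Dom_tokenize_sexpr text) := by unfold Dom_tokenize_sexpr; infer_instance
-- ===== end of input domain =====

-- B replaces A's index-driven character loop with a regex-style tokenizer (one master
-- pattern; quoted strings are matched raw and unescaped in a second pass). Objective: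
-- idiomatic; same O(n) cost, measurably faster by a constant factor (regex engine).

-- ===== PORT A =====
-- A's inner `while` for quoted strings: returns (buf, remaining chars at the break point).
def pyQuoteLoopA : List Char → List Char × List Char
  | [] => ([], [])
  | '\\' :: d :: rest => (d :: (pyQuoteLoopA rest).1, (pyQuoteLoopA rest).2)
  | '"' :: rest => ([], '"' :: rest)
  | c :: rest => (c :: (pyQuoteLoopA rest).1, (pyQuoteLoopA rest).2)

-- A's post-loop `if i < n and text[i] == '"': i += 1`.
def quotePostA : List Char → List Char
  | '"' :: t => t
  | r => r

-- A's bare-atom `while` loop: collects chars until whitespace or a paren.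
def pyAtomLoopA : List Char → List Char × List Char
  | [] => ([], [])
  | c :: rest =>
    if PySem.Chars.isspace c || c == '(' || c == ')' then ([], c :: rest)
    else (c :: (pyAtomLoopA rest).1, (pyAtomLoopA rest).2)

theorem pyQuoteLoopA_len : ∀ l : List Char, (pyQuoteLoopA l).2.length ≤ l.length := by
  intro l
  fun_induction pyQuoteLoopA l <;> simp_all <;> omega

theorem quotePostA_len : ∀ l : List Char, (quotePostA l).length ≤ l.length := by
  intro l
  unfold quotePostA
  split <;> simp

theorem pyAtomLoopA_len : ∀ l : List Char, (pyAtomLoopA l).2.length ≤ l.length := by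
  intro l
  fun_induction pyAtomLoopA l
  · simp
  · simp
  · simp_all
    omega

-- A's outer `while i < n` loop over the characters.
def scanA : List Char → List String
  | [] => []
  | c :: rest =>
    if PySem.Chars.isspace c then scanA rest
    else if c == '(' || c == ')' then String.ofList [c] :: scanA rest
    else if c == '"' then
      let p := pyQuoteLoopA rest
      String.ofList ('"' :: p.1 ++ ['"']) :: scanA (quotePostA p.2)
    else
      -- first atom iteration is c itself (it passed every branch above)
      let p := pyAtomLoopA rest
      String.ofList (c :: p.1) :: scanA p.2
termination_by l => l.length
decreasing_by
  · simp
  · simp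
  · have h1 := quotePostA_len (pyQuoteLoopA rest).2
    have h2 := pyQuoteLoopA_len rest
    simp; omega
  · have := pyAtomLoopA_len rest
    simp; omega

def tokenize_sexpr (text : String) : List String := scanA text.toList

-- ===== PORT B =====
-- regex alternative `"((?:\\.|[^"])*)"?` (DOTALL): returns (group 1, chars after the match).
def matchQuotedB : List Char → List Char × List Char
  | [] => ([], [])
  | '\\' :: d :: rest => ('\\' :: d :: (matchQuotedB rest).1, (matchQuotedB rest).2)
  | '"' :: rest => ([], rest)
  | c :: rest => (c :: (matchQuotedB rest).1, (matchQuotedB rest).2)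

-- `_ESC.sub(r'\1', inner)`: left-to-right replacement of `\\(.)` by the captured char.
def unescapeB : List Char → List Char
  | [] => []
  | '\\' :: d :: rest => d :: unescapeB rest
  | c :: rest => c :: unescapeB rest

-- the bare-atom char class [^\s()]
def atomCharB (c : Char) : Bool := !(PySem.Chars.isspace c || c == '(' || c == ')')

theorem matchQuotedB_len : ∀ l : List Char, (matchQuotedB l).2.length ≤ l.length := by
  intro l
  fun_induction matchQuotedB l <;> simp_all <;> omega

-- the finditer scan: at each position try the alternatives in pattern order; unmatched
-- (whitespace) characters are skipped.
def scanB : List Char → List String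
  | [] => []
  | c :: rest =>
    if c == '"' then
      let p := matchQuotedB rest
      String.ofList ('"' :: unescapeB p.1 ++ ['"']) :: scanB p.2
    else if c == '(' || c == ')' then String.ofList [c] :: scanB rest
    else if PySem.Chars.isspace c then scanB rest
    else
      -- [^\s()]+ is greedy: c matches it, then the longest run of atom chars
      String.ofList (c :: rest.takeWhile atomCharB) :: scanB (rest.dropWhile atomCharB)
termination_by l => l.length
decreasing_by
  · have := matchQuotedB_len rest
    simp; omega
  · simp
  · simp
  · have := List.length_dropWhile_le atomCharB rest
    simp; omega

def tokenize_sexpr_alt (text : String) : List String := scanB text.toList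

-- ===== PRECONDITION & SPEC =====
def Spec_tokenize_sexpr (text : String) (out : List String) : Prop := out = tokenize_sexpr_alt text
instance (text : String) (out : List String) : Decidable (Spec_tokenize_sexpr text out) := by unfold Spec_tokenize_sexpr; infer_instance

-- ===== CLAIM (what is proved, stated in full; the proofs are below) =====
def Claim_equal_tokenize_sexpr : Prop := ∀ (text : String), Dom_tokenize_sexpr text → Spec_tokenize_sexpr text (tokenize_sexpr text)

-- ===== LEMMAS AND PROOFS =====

-- B's raw match + second-pass unescape computes exactly A's inline buffer, and both
-- leave the scan at the same remaining characters.
theorem quote_bridge : ∀ l : List Char,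
    unescapeB (matchQuotedB l).1 = (pyQuoteLoopA l).1 ∧
    (matchQuotedB l).2 = quotePostA (pyQuoteLoopA l).2 := by
  intro l
  fun_induction matchQuotedB l with
  | case1 => simp [pyQuoteLoopA, unescapeB, quotePostA]
  | case2 d rest ih =>
    simpa [pyQuoteLoopA, unescapeB] using ih
  | case3 rest => simp [pyQuoteLoopA, unescapeB, quotePostA]
  | case4 c rest h1 h2 ih =>
    have hq : ¬ c = '"' := fun he => h2 he
    cases rest with
    | nil =>
      simp [pyQuoteLoopA, matchQuotedB, unescapeB, quotePostA]
    | cons d t =>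
      have hc : ¬ c = '\\' := fun he => h1 d t he rfl
      simp [pyQuoteLoopA, unescapeB, hc, ih.1, ih.2]

theorem atom_bridge : ∀ l : List Char,
    pyAtomLoopA l = (l.takeWhile atomCharB, l.dropWhile atomCharB) := by
  intro l
  induction l with
  | nil => simp [pyAtomLoopA]
  | cons c rest ih =>
    by_cases h : PySem.Chars.isspace c || c == '(' || c == ')'
    · simp [pyAtomLoopA, h, List.takeWhile, List.dropWhile, atomCharB]
    · simp [pyAtomLoopA, h, List.takeWhile, List.dropWhile, atomCharB, ih]

theorem scan_eq : ∀ l : List Char, scanA l = scanB l := by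
  intro l
  fun_induction scanA l with
  | case1 => simp [scanB]
  | case2 c rest h ih =>
    have h1 : ¬ c = '"' := by rintro rfl; exact absurd h (by decide)
    have h2 : ¬ c = '(' := by rintro rfl; exact absurd h (by decide)
    have h3 : ¬ c = ')' := by rintro rfl; exact absurd h (by decide)
    simp [scanB, h, h1, h2, h3, ih]
  | case3 c rest h1 h2 ih =>
    have hq : ¬ c = '"' := by
      rintro rfl; exact absurd h2 (by decide)
    simp only [scanB]
    simp [hq, h2, ih]
  | case4 c rest h1 h2 h3 p ih =>
    simp only [scanB]
    have h3' : (c == '"') = true := by simpa using h3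
    rw [h3']
    simp only [if_true]
    have hb := quote_bridge rest
    rw [hb.1, hb.2]
    exact congrArg _ ih
  | case5 c rest h1 h2 h3 p ih =>
    have h3' : ¬ c = '"' := by simpa using h3
    simp only [scanB]
    have ha := atom_bridge rest
    rw [show p = pyAtomLoopA rest from rfl, ha] at ih ⊢
    simp [h3', h2, h1, ih]

-- ===== VERDICT (by name: the statement is the Claim_ definition above) =====
theorem tokenize_sexpr_spec : Claim_equal_tokenize_sexpr := by
  intro text _
  unfold Spec_tokenize_sexpr tokenize_sexpr tokenize_sexpr_alt
  exact scan_eq text.toList
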